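-- pv_equiv track=rewrite | github.com/ryanprescott-zz/ruckus | agent/src/ruckus_agent/utils/model_discovery.py | _determine_model_format
-- ===== SOURCE A (Python) =====
-- from typing import Dict, List, Optional, Any
--
-- def _determine_model_format(model_files: List[str]) -> str:
--     """Determine the primary model format based on files present."""
--     if any(f.endswith(".safetensors") for f in model_files):
--         return "safetensors"
--     elif any(f.endswith(".bin") for f in model_files):
--         return "pytorch"
--     elif any(f.endswith(".gguf") for f in model_files):
--         return "gguf"
--     elif any(f.endswith(".ggml") for f in model_files):
--         return "ggml"
--     elif any(f.endswith(".pt") or f.endswith(".pth") for f in model_files):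
--         return "pytorch"
--     else:
--         return "unknown"
-- ===== SOURCE B (Python) =====
-- from typing import Dict, List, Optional, Any
--
-- _EXTS = (".safetensors", ".bin", ".gguf", ".ggml", ".pt", ".pth")
-- _PRIORITY = [((".safetensors",), "safetensors"),
--              ((".bin",), "pytorch"),
--              ((".gguf",), "gguf"),
--              ((".ggml",), "ggml"),
--              ((".pt", ".pth"), "pytorch")]
--
--
-- def _determine_model_format(model_files: List[str]) -> str:
--     """Determine the primary model format based on files present."""
--     present = set()
--     for f in model_files:
--         for ext in _EXTS:
--             if f.endswith(ext):
--                 present.add(ext)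
--     for exts, fmt in _PRIORITY:
--         if any(e in present for e in exts):
--             return fmt
--     return "unknown"
-- ===== Notes on version B (the rewrite author's own statement) =====
-- stated objective: alternative
-- what changed: B makes one pass over the files collecting the set of known extensions present, then resolves the format by scanning a fixed priority table, instead of A's chain of up to five separate any-scans over the file list.
import Mathlib
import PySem

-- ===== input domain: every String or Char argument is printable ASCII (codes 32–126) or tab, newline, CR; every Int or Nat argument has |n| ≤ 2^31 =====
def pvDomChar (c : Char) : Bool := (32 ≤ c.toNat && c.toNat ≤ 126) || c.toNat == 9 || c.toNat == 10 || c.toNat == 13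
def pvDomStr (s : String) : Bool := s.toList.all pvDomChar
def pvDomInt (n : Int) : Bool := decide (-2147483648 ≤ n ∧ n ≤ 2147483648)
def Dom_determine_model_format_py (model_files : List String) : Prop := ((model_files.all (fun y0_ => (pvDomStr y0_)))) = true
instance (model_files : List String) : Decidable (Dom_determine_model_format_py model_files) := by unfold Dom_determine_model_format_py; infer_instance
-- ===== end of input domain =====

-- B collects the present known suffixes in one pass, then consults a priority table; proved equal to A's chain of repeated scans.

-- ===== PORT A =====
def determine_model_format_py (model_files : List String) : String :=
  if model_files.any (fun f => PySem.Str.endswith f ".safetensors") then "safetensors"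
  else if model_files.any (fun f => PySem.Str.endswith f ".bin") then "pytorch"
  else if model_files.any (fun f => PySem.Str.endswith f ".gguf") then "gguf"
  else if model_files.any (fun f => PySem.Str.endswith f ".ggml") then "ggml"
  else if model_files.any (fun f => PySem.Str.endswith f ".pt" || PySem.Str.endswith f ".pth") then "pytorch"
  else "unknown"

-- ===== PORT B =====
def pvExts : List String := [".safetensors", ".bin", ".gguf", ".ggml", ".pt", ".pth"]

def pvPriority : List (List String × String) :=
  [([".safetensors"], "safetensors"), ([".bin"], "pytorch"), ([".gguf"], "gguf"),
   ([".ggml"], "ggml"), ([".pt", ".pth"], "pytorch")]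

-- one pass over the files: the set of known extensions that occur
def pvPresent (model_files : List String) : PySem.Set String :=
  model_files.foldl
    (fun s f => pvExts.foldl (fun s e => if PySem.Str.endswith f e then PySem.Set.add s e else s) s)
    PySem.Set.empty

def pvScan (present : PySem.Set String) : List (List String × String) → String
  | [] => "unknown"
  | (exts, fmt) :: rest =>
      if exts.any (fun e => PySem.Set.contains present e) then fmt else pvScan present rest

def determine_model_format_py_alt (model_files : List String) : String :=
  pvScan (pvPresent model_files) pvPriority

-- ===== PRECONDITION & SPEC =====
def Spec_determine_model_format_py (model_files : List String) (out : String) : Prop := out = determine_model_format_py_alt model_files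
instance (model_files : List String) (out : String) : Decidable (Spec_determine_model_format_py model_files out) := by unfold Spec_determine_model_format_py; infer_instance

-- ===== CLAIM (what is proved, stated in full; the proofs are below) =====
def Claim_equal_determine_model_format_py : Prop := ∀ (model_files : List String), Dom_determine_model_format_py model_files → Spec_determine_model_format_py model_files (determine_model_format_py model_files)

-- ===== LEMMAS AND PROOFS =====

theorem contains_add (s : List String) (x e : String) :
    PySem.Set.contains (PySem.Set.add s x) e = (PySem.Set.contains s e || e == x) := by
  rw [Bool.eq_iff_iff]
  simp only [PySem.Set.contains_iff, Bool.or_eq_true, beq_iff_eq, PySem.Set.mem_add]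

theorem contains_foldl_not_mem (exts : List String) (f : String) (e : String) :
    ∀ (s : List String), e ∉ exts →
    PySem.Set.contains
      (exts.foldl (fun s x => if PySem.Str.endswith f x then PySem.Set.add s x else s) s) e
      = PySem.Set.contains s e := by
  induction exts with
  | nil => intro s _; rfl
  | cons x rest ih =>
      intro s he
      simp only [List.mem_cons, not_or] at he
      rw [List.foldl_cons, ih _ he.2]
      split_ifs with h
      · rw [contains_add]
        simp [beq_iff_eq, he.1]
      · rfl

theorem contains_inner (f : String) (e : String) :
    ∀ (s : List String), e ∈ pvExts →
    PySem.Set.contains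
      (pvExts.foldl (fun s x => if PySem.Str.endswith f x then PySem.Set.add s x else s) s) e
      = (PySem.Set.contains s e || PySem.Str.endswith f e) := by
  generalize pvExts = exts
  induction exts with
  | nil => intro s he; cases he
  | cons x rest ih =>
      intro s he
      by_cases hr : e ∈ rest
      · rw [List.foldl_cons, ih _ hr]
        split_ifs with h
        · rw [contains_add]
          by_cases hex : e = x
          · subst hex
            simp only [PySem.Str.endswith] at h
            simp [h]
          · have hb : (e == x) = false := by simp [hex]
            simp [hb]
        · rfl
      · have hex : e = x := by rcases List.mem_cons.1 he with h | h; exact h; exact absurd h hr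
        subst hex
        rw [List.foldl_cons, contains_foldl_not_mem _ _ _ _ hr]
        split_ifs with h <;> simp only [PySem.Str.endswith] at h
        · rw [contains_add]; simp [h]
        · simp [h]

theorem contains_present_aux (files : List String) (s : List String) (e : String) (he : e ∈ pvExts) :
    PySem.Set.contains
      (files.foldl (fun s f => pvExts.foldl (fun s x => if PySem.Str.endswith f x then PySem.Set.add s x else s) s) s) e
      = (PySem.Set.contains s e || files.any (fun f => PySem.Str.endswith f e)) := by
  induction files generalizing s with
  | nil => simp
  | cons f rest ih =>
      simp only [List.foldl_cons, List.any_cons, ih _, contains_inner f e s he, Bool.or_assoc]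

theorem contains_present (files : List String) (e : String) (he : e ∈ pvExts) :
    PySem.Set.contains (pvPresent files) e = files.any (fun f => PySem.Str.endswith f e) := by
  have h := contains_present_aux files PySem.Set.empty e he
  simpa [pvPresent, PySem.Set.empty, PySem.Set.contains] using h

theorem any_endswith_or (files : List String) :
    files.any (fun f => PySem.Str.endswith f ".pt" || PySem.Str.endswith f ".pth")
      = (files.any (fun f => PySem.Str.endswith f ".pt") || files.any (fun f => PySem.Str.endswith f ".pth")) := by
  induction files with
  | nil => rfl
  | cons f rest ih =>
      simp only [List.any_cons, ih]
      rw [Bool.eq_iff_iff]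
      simp only [Bool.or_eq_true]
      tauto

-- ===== VERDICT (by name: the statement is the Claim_ definition above) =====
theorem determine_model_format_py_spec : Claim_equal_determine_model_format_py := by
  intro files _
  unfold Spec_determine_model_format_py determine_model_format_py determine_model_format_py_alt
  simp only [pvPriority, pvScan, List.any_cons, List.any_nil, Bool.or_false,
    contains_present files _ (by decide : (".safetensors" : String) ∈ pvExts),
    contains_present files _ (by decide : (".bin" : String) ∈ pvExts),
    contains_present files _ (by decide : (".gguf" : String) ∈ pvExts),
    contains_present files _ (by decide : (".ggml" : String) ∈ pvExts),
    contains_present files _ (by decide : (".pt" : String) ∈ pvExts),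
    contains_present files _ (by decide : (".pth" : String) ∈ pvExts),
    any_endswith_or files]
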